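-- pv_equiv track=rewrite | github.com/okara83/Becoming-a-Data-Scientist | Data Science and Machine Learning/TRAINING-THOROUGH/EXAMPLES/EDABIT/EXPERT/001_100/79_indices_of_zeroes_for_the_longest_run_of_contiguous_ones.py | zero_indices
-- ===== SOURCE A (Python) =====
-- def zero_indices(lst, k):
--
--     start, count, block = 0, 0, 0
--     index = 0
--     for i in range(len(lst)):
--
--         if lst[i] == 0: count = count + 1
--         while count > k:
--             if lst[start] == 0: count = count - 1
--             start += 1
--         if i - start + 1 > block:
--             block = i - start + 1
--             index = start
--     rr=[]
--     for i in range(index, index + block):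
--         if lst[i] == 0: rr.append(i)
--
--     return (rr)
-- ===== SOURCE B (Python) =====
-- def zero_indices(lst, k):
--     n = len(lst)
--     Z = [i for i, x in enumerate(lst) if x == 0]
--     m = len(Z)
--     if m <= k:
--         return Z
--     best_len, best_left, best_right = 0, 0, -1
--     for j in range(m - k + 1):
--         left = Z[j - 1] + 1 if j > 0 else 0
--         right = Z[j + k] - 1 if j + k < m else n - 1
--         if right - left + 1 > best_len:
--             best_len, best_left, best_right = right - left + 1, left, right
--     return [z for z in Z if best_left <= z <= best_right]
-- ===== Notes on version B (the rewrite author's own statement) =====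
-- stated objective: faster
-- what changed: Replaces A's two-pointer sliding window over every position (inner shrink-while loop with a running count) by precomputing the list of zero positions and maximising directly over the maximal windows determined by each group of k consecutive zeros, so the main loop runs over the zeros only.
-- outside the precondition, e.g. on zero_indices([], -1): A returns [], B raises IndexError
import Mathlib
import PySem

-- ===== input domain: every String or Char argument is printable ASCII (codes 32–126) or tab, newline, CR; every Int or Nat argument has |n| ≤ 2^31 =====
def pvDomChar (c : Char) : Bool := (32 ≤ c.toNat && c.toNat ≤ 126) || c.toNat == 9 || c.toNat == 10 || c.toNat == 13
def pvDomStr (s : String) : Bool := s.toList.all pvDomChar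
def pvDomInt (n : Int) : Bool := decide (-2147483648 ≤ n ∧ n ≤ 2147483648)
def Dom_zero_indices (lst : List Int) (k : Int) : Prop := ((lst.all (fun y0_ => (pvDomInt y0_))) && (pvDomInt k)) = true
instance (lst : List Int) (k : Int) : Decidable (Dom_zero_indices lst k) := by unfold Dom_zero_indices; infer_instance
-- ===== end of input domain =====

-- B replaces A's sliding window by a direct scan over the list of zero positions:
-- each group of k consecutive zeros determines one maximal window, and B maximises
-- over those windows, so its main loop runs over the zeros only (measured
-- constant-factor speedup; both are linear).

-- ===== PORT A =====
-- the 'while count > k' loop; the guard 'start < lst.length' only makes the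
-- recursion total: Python raises IndexError there (possible only for k < 0,
-- excluded by Pre_), so the port is exact wherever Python returns.
def zeroWhile (lst : List Int) (k : Int) (start : Nat) (count : Int) : Nat × Int :=
  if h : k < count ∧ start < lst.length then
    zeroWhile lst k (start + 1) (if lst.getD start 0 = 0 then count - 1 else count)
  else (start, count)
termination_by lst.length - start

def zero_indices (lst : List Int) (k : Int) : List Int :=
  -- state (start, count, block, index); start/index stay ≥ 0 in Python, kept as Nat
  let st := (List.range lst.length).foldl
    (fun (st : Nat × Int × Int × Nat) i =>
      let count1 := if lst.getD i 0 = 0 then st.2.1 + 1 else st.2.1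
      let sc := zeroWhile lst k st.1 count1
      if (i : Int) - sc.1 + 1 > st.2.2.1 then (sc.1, sc.2, (i : Int) - sc.1 + 1, sc.1)
      else (sc.1, sc.2, st.2.2.1, st.2.2.2))
    (0, 0, 0, 0)
  (PySem.List.pyRange (st.2.2.2 : Int) ((st.2.2.2 : Int) + st.2.2.1) 1).foldl
    (fun rr i => if PySem.List.pyGet? lst i = some 0 then rr ++ [i] else rr) []

-- ===== PORT B =====
def zero_indices_alt (lst : List Int) (k : Int) : List Int :=
  let n : Int := lst.length
  let Z : List Int := (List.range lst.length).filterMap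
    (fun i => if lst.getD i 0 = 0 then some (i : Int) else none)
  let m : Int := Z.length
  if m ≤ k then Z
  else
    -- Python indexes Z[j+k] with j+k ≥ 0 (k ≥ 0 under Pre_), so j + k.toNat is exact
    let st := (List.range (m - k + 1).toNat).foldl
      (fun (st : Int × Int × Int) j =>
        let left : Int := if 0 < j then Z.getD (j - 1) 0 + 1 else 0
        let right : Int := if (j : Int) + k < m then Z.getD (j + k.toNat) 0 - 1 else n - 1
        if right - left + 1 > st.1 then (right - left + 1, left, right) else st)
      (0, 0, -1)
    Z.filter (fun z => st.2.1 ≤ z && z ≤ st.2.2)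

-- ===== PRECONDITION & SPEC =====
-- Pre_ excludes negative k: there A raises IndexError on every nonempty list and
-- returns [] only on the empty list, where B's zero-window index arithmetic raises.
def Pre_zero_indices (lst : List Int) (k : Int) : Prop := 0 ≤ k
instance (lst : List Int) (k : Int) : Decidable (Pre_zero_indices lst k) := by
  unfold Pre_zero_indices; infer_instance
def pvWitness_zero_indices : List Int × Int := ([1, 0, 1, 0, 1], 1)

def Spec_zero_indices (lst : List Int) (k : Int) (out : List Int) : Prop := out = zero_indices_alt lst k
instance (lst : List Int) (k : Int) (out : List Int) : Decidable (Spec_zero_indices lst k out) := by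
  unfold Spec_zero_indices; infer_instance

-- ===== CLAIM (what is proved, stated in full; the proofs are below) =====
def Claim_equal_zero_indices : Prop := ∀ (lst : List Int) (k : Int), Dom_zero_indices lst k → Pre_zero_indices lst k → Spec_zero_indices lst k (zero_indices lst k)

-- ===== LEMMAS AND PROOFS =====

-- zero positions, prefix zero count, canonical window start
def ZI (lst : List Int) : List Nat := (List.range lst.length).filter (fun i => lst.getD i 0 = 0)
def pcnt (lst : List Int) (t : Nat) : Nat := ((ZI lst).filter (fun z => z < t)).length
def sFm (lst : List Int) (kn : Nat) (t : Nat) : Nat :=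
  if pcnt lst t ≤ kn then 0 else (ZI lst).getD (pcnt lst t - kn - 1) 0 + 1

lemma mem_ZI (lst : List Int) (x : Nat) :
    x ∈ ZI lst ↔ x < lst.length ∧ lst.getD x 0 = 0 := by
  simp [ZI, List.mem_filter, List.mem_range]

lemma ZI_sorted (lst : List Int) : List.Pairwise (· < ·) (ZI lst) :=
  List.pairwise_lt_range.filter _

lemma ZI_lt_length (lst : List Int) (x : Nat) (hx : x ∈ ZI lst) : x < lst.length :=
  ((mem_ZI lst x).1 hx).1

-- strict monotonicity of getD on a sorted list
lemma sorted_getD_lt {l : List Nat} (h : List.Pairwise (· < ·) l) {i j : Nat}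
    (hij : i < j) (hj : j < l.length) : l.getD i 0 < l.getD j 0 := by
  have := (List.pairwise_iff_getElem (R := (· < · : Nat → Nat → Prop)) (l := l)).1 h i j
    (lt_trans hij hj) hj hij
  simpa [List.getD_eq_getElem?_getD, lt_trans hij hj, hj] using this

lemma sorted_getD_le {l : List Nat} (h : List.Pairwise (· < ·) l) {i j : Nat}
    (hij : i ≤ j) (hj : j < l.length) : l.getD i 0 ≤ l.getD j 0 := by
  rcases Nat.eq_or_lt_of_le hij with rfl | hlt
  · exact le_refl _
  · exact le_of_lt (sorted_getD_lt h hlt hj)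

-- a member sits at position = number of smaller elements
lemma sorted_getD_count (l : List Nat) :
    List.Pairwise (· < ·) l → ∀ u : Nat, u ∈ l →
      l.getD ((l.filter (fun z => z < u)).length) 0 = u := by
  induction l with
  | nil => intro _ u hu; simp at hu
  | cons a tl ih =>
    intro h u hu
    rcases List.pairwise_cons.1 h with ⟨ha, htl⟩
    rcases List.mem_cons.1 hu with rfl | hu'
    · simp only [List.filter_cons]
      rw [if_neg (by simp)]
      rw [List.filter_eq_nil_iff.2 (by intro z hz; have := ha z hz; simp; omega)]
      simp
    · have hau : a < u := ha u hu'
      simp only [List.filter_cons]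
      rw [if_pos (by simpa using hau)]
      simpa [List.getD_eq_getElem?_getD] using ih htl u hu'

-- counting bounds on a sorted list
lemma sorted_count_le (l : List Nat) :
    ∀ r : Nat, (∀ i (h : i < l.length), r ≤ i → ¬ l[i] < t) →
      (l.filter (fun z => z < t)).length ≤ r := by
  induction l with
  | nil => intro r _; simp
  | cons a tl ih =>
    intro r hub
    cases r with
    | zero =>
      have : ∀ z ∈ a :: tl, ¬ z < t := by
        intro z hz
        rcases List.mem_iff_getElem.1 hz with ⟨i, hi, rfl⟩
        exact hub i hi (Nat.zero_le _)
      rw [List.filter_eq_nil_iff.2 (by intro z hz; have := this z hz; simp; omega)]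
      simp
    | succ r =>
      have := ih r (fun i h hr => by simpa using hub (i+1) (by simpa using h) (by omega))
      simp only [List.filter_cons]
      split <;> simp <;> omega

lemma sorted_count_ge (l : List Nat) :
    ∀ r : Nat, r ≤ l.length → (∀ i (h : i < l.length), i < r → l[i] < t) →
      r ≤ (l.filter (fun z => z < t)).length := by
  induction l with
  | nil => intro r hr _; simpa using hr
  | cons a tl ih =>
    intro r hr hlb
    cases r with
    | zero => simp
    | succ r =>
      have h0 : a < t := by simpa using hlb 0 (by simp) (by omega)
      have := ih r (by simpa using hr)
        (fun i h hi => by simpa using hlb (i+1) (by simpa using h) (by omega))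
      simp only [List.filter_cons]
      rw [if_pos (by simpa using h0)]
      simp; omega

-- pcnt step
lemma countP_lt_succ (t : Nat) (l : List Nat) :
    List.Nodup l → (l.filter (fun z => z < t+1)).length =
      (l.filter (fun z => z < t)).length + (if t ∈ l then 1 else 0) := by
  simp only [← List.countP_eq_length_filter]
  induction l with
  | nil => intro _; simp
  | cons a tl ih =>
    intro h
    rcases List.nodup_cons.1 h with ⟨hna, htl⟩
    rw [List.countP_cons, List.countP_cons, ih htl]
    by_cases hat : a = t
    · subst hat
      rw [show (decide (a < a + 1)) = true by simp,
          show (decide (a < a)) = false by simp,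
          if_pos (List.mem_cons_self), if_neg hna]
      simp
    · rw [decide_eq_decide.mpr (show (a < t + 1) ↔ (a < t) by omega)]
      have : (t ∈ a :: tl) ↔ (t ∈ tl) := by
        simp [List.mem_cons]; intro h'; exact absurd h'.symm hat
      rw [if_congr this rfl rfl]
      omega

lemma ZI_nodup (lst : List Int) : (ZI lst).Nodup := (List.nodup_range).filter _

lemma pcnt_succ (lst : List Int) (t : Nat) :
    pcnt lst (t+1) = pcnt lst t + (if t < lst.length ∧ lst.getD t 0 = 0 then 1 else 0) := by
  unfold pcnt
  rw [countP_lt_succ t _ (ZI_nodup lst)]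
  congr 1
  by_cases h : t ∈ ZI lst
  · rw [if_pos h, if_pos ((mem_ZI lst t).1 h)]
  · rw [if_neg h, if_neg (fun hc => h ((mem_ZI lst t).2 hc))]

lemma pcnt_le_len (lst : List Int) (t : Nat) : pcnt lst t ≤ (ZI lst).length :=
  List.length_filter_le _ _

lemma pcnt_lt_of_mem (lst : List Int) (t : Nat) (h : t ∈ ZI lst) :
    pcnt lst t < (ZI lst).length :=
  List.length_filter_lt_length_iff_exists.mpr ⟨t, h, by simp⟩

lemma pcnt_getD (lst : List Int) (t : Nat) (h : t ∈ ZI lst) :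
    (ZI lst).getD (pcnt lst t) 0 = t :=
  sorted_getD_count _ (ZI_sorted lst) t h

-- the while loop does nothing when count ≤ k
lemma zeroWhile_no (lst : List Int) (k : Int) (s : Nat) (count : Int) (h : count ≤ k) :
    zeroWhile lst k s count = (s, count) := by
  unfold zeroWhile
  rw [dif_neg (by omega)]

-- the while loop passes exactly one zero when count = k+1 (k ≥ 0)
lemma zeroWhile_pass (lst : List Int) (k : Int) (hk : 0 ≤ k) :
    ∀ d s z : Nat, z - s = d → s ≤ z → z < lst.length → lst.getD z 0 = 0 →
      (∀ u, s ≤ u → u < z → ¬ lst.getD u 0 = 0) →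
      zeroWhile lst k s (k+1) = (z+1, k) := by
  intro d
  induction d with
  | zero =>
    intro s z hd hsz hzn hz _
    have : s = z := by omega
    subst this
    unfold zeroWhile
    rw [dif_pos ⟨by omega, by omega⟩, if_pos hz]
    have : k + 1 - 1 = k := by ring
    rw [this, zeroWhile_no lst k (s+1) k le_rfl]
  | succ d ih =>
    intro s z hd hsz hzn hz hno
    have hslt : s < z := by omega
    unfold zeroWhile
    rw [dif_pos ⟨by omega, by omega⟩, if_neg (hno s le_rfl hslt)]
    exact ih (s+1) z (by omega) (by omega) hzn hz (fun u hu1 hu2 => hno u (by omega) hu2)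

lemma getD_mem_of_lt (l : List Nat) (i : Nat) (h : i < l.length) : l.getD i 0 ∈ l := by
  rw [List.getD_eq_getElem?_getD]
  simp only [List.getElem?_eq_getElem h, Option.getD_some]
  exact List.getElem_mem h

lemma pcnt_zero (lst : List Int) : pcnt lst 0 = 0 := by
  unfold pcnt
  rw [List.filter_eq_nil_iff.2 (by intro z _; simp)]
  rfl

-- one outer iteration of A's while loop, in closed form
lemma whileStep (lst : List Int) (k : Int) (hk : 0 ≤ k) (t : Nat) (ht : t < lst.length) :
    zeroWhile lst k (sFm lst k.toNat t)
      (if lst.getD t 0 = 0 then ((min (pcnt lst t) k.toNat : Nat) : Int) + 1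
       else ((min (pcnt lst t) k.toNat : Nat) : Int))
    = (sFm lst k.toNat (t+1), ((min (pcnt lst (t+1)) k.toNat : Nat) : Int)) := by
  have hkk : ((k.toNat : Nat) : Int) = k := Int.toNat_of_nonneg hk
  set kn := k.toNat with hkn
  set c := pcnt lst t with hc
  by_cases hz : lst.getD t 0 = 0
  · have htZ : t ∈ ZI lst := (mem_ZI lst t).2 ⟨ht, hz⟩
    have hsucc : pcnt lst (t+1) = c + 1 := by
      rw [pcnt_succ, if_pos ⟨ht, hz⟩]
    have hcidx : (ZI lst).getD c 0 = t := pcnt_getD lst t htZ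
    have hcm : c < (ZI lst).length := pcnt_lt_of_mem lst t htZ
    rw [if_pos hz]
    by_cases hck : c < kn
    · have h1 : min c kn = c := by omega
      have h2 : min (c+1) kn = c + 1 := by omega
      have h3 : sFm lst kn t = 0 := by unfold sFm; rw [if_pos (by omega)]
      have h4 : sFm lst kn (t+1) = 0 := by unfold sFm; rw [hsucc, if_pos (by omega)]
      rw [h1, h3, h4, hsucc, h2, zeroWhile_no _ _ _ _ (by omega)]
      simp
    · have h1 : min c kn = kn := by omega
      set z := (ZI lst).getD (c - kn) 0 with hzdef
      have hzm : c - kn < (ZI lst).length := by omega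
      have hzt : z ≤ t := by
        rw [← hcidx]; exact sorted_getD_le (ZI_sorted lst) (by omega) hcm
      have hzZ : z ∈ ZI lst := getD_mem_of_lt _ _ hzm
      have hzlen : z < lst.length := ZI_lt_length lst z hzZ
      have hzzero : lst.getD z 0 = 0 := ((mem_ZI lst z).1 hzZ).2
      have hsz : sFm lst kn t ≤ z := by
        unfold sFm
        rw [← hc]
        by_cases hceq : c ≤ kn
        · rw [if_pos hceq]; omega
        · rw [if_neg hceq]
          have := sorted_getD_lt (ZI_sorted lst) (show c - kn - 1 < c - kn by omega) hzm
          omega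
      have hno : ∀ u, sFm lst kn t ≤ u → u < z → ¬ lst.getD u 0 = 0 := by
        intro u h1u h2u h0
        have huZ : u ∈ ZI lst := (mem_ZI lst u).2 ⟨by omega, h0⟩
        rcases List.mem_iff_getElem.1 huZ with ⟨j, hj, hju⟩
        have hjgd : (ZI lst).getD j 0 = u := by
          rw [List.getD_eq_getElem?_getD]
          simp [List.getElem?_eq_getElem hj, hju]
        have hjlt : j < c - kn := by
          by_contra hge
          have := sorted_getD_le (ZI_sorted lst) (show c - kn ≤ j by omega) hj
          rw [hjgd] at this; omega
        by_cases hceq : c ≤ kn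
        · omega
        · have hle : u ≤ (ZI lst).getD (c - kn - 1) 0 := by
            rw [← hjgd]
            exact sorted_getD_le (ZI_sorted lst) (by omega) (by omega)
          have hsf : sFm lst kn t = (ZI lst).getD (c - kn - 1) 0 + 1 := by
            unfold sFm; rw [← hc, if_neg hceq]
          omega
      have hcount : ((min c kn : Nat) : Int) + 1 = k + 1 := by rw [h1, hkn, hkk]
      rw [hcount, zeroWhile_pass lst k hk (z - sFm lst kn t) (sFm lst kn t) z rfl hsz hzlen hzzero hno]
      have h5 : sFm lst kn (t+1) = z + 1 := by
        unfold sFm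
        rw [hsucc, if_neg (by omega)]
        congr 2
        omega
      have h6 : min (pcnt lst (t+1)) kn = kn := by rw [hsucc]; omega
      rw [h5, h6, hkn, hkk]
  · have hsame : pcnt lst (t+1) = c := by
      rw [pcnt_succ, if_neg (by tauto)]
      omega
    have hsf : sFm lst kn (t+1) = sFm lst kn t := by unfold sFm; rw [hsame]
    rw [if_neg hz, hsame, zeroWhile_no _ _ _ _ (by omega), hsf]

-- A's loop body, named
def aStep (lst : List Int) (k : Int) (st : Nat × Int × Int × Nat) (i : Nat) :
    Nat × Int × Int × Nat :=
  let count1 := if lst.getD i 0 = 0 then st.2.1 + 1 else st.2.1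
  let sc := zeroWhile lst k st.1 count1
  if (i : Int) - sc.1 + 1 > st.2.2.1 then (sc.1, sc.2, (i : Int) - sc.1 + 1, sc.1)
  else (sc.1, sc.2, st.2.2.1, st.2.2.2)

lemma zero_indices_def (lst : List Int) (k : Int) :
    zero_indices lst k =
      (PySem.List.pyRange (((List.range lst.length).foldl (aStep lst k) (0, 0, 0, 0)).2.2.2 : Int)
        ((((List.range lst.length).foldl (aStep lst k) (0, 0, 0, 0)).2.2.2 : Int) +
          ((List.range lst.length).foldl (aStep lst k) (0, 0, 0, 0)).2.2.1) 1).foldl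
        (fun rr i => if PySem.List.pyGet? lst i = some 0 then rr ++ [i] else rr) [] := rfl

-- formula state and best-window (block, index) accumulator
def bmStep (lst : List Int) (kn : Nat) (s : Int × Nat) (i : Nat) : Int × Nat :=
  if (i : Int) - sFm lst kn (i+1) + 1 > s.1 then ((i : Int) - sFm lst kn (i+1) + 1, sFm lst kn (i+1))
  else s
def bmF (lst : List Int) (kn : Nat) (t : Nat) : Int × Nat :=
  (List.range t).foldl (bmStep lst kn) (0, 0)

lemma aStep_formula (lst : List Int) (k : Int) (hk : 0 ≤ k) (t : Nat) (ht : t < lst.length)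
    (b : Int) (x : Nat) :
    aStep lst k (sFm lst k.toNat t, ((min (pcnt lst t) k.toNat : Nat) : Int), b, x) t =
      (sFm lst k.toNat (t+1), ((min (pcnt lst (t+1)) k.toNat : Nat) : Int),
        (bmStep lst k.toNat (b, x) t).1, (bmStep lst k.toNat (b, x) t).2) := by
  unfold aStep bmStep
  simp only
  rw [whileStep lst k hk t ht]
  split <;> rfl

-- A's fold state in closed form
lemma stateA (lst : List Int) (k : Int) (hk : 0 ≤ k) :
    ∀ t, t ≤ lst.length →
      (List.range t).foldl (aStep lst k) (0, 0, 0, 0) =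
        (sFm lst k.toNat t, ((min (pcnt lst t) k.toNat : Nat) : Int),
          (bmF lst k.toNat t).1, (bmF lst k.toNat t).2) := by
  intro t
  induction t with
  | zero =>
    intro _
    have h0 : sFm lst k.toNat 0 = 0 := by unfold sFm; rw [pcnt_zero, if_pos (by omega)]
    simp [bmF, h0, pcnt_zero]
  | succ t ih =>
    intro ht
    rw [List.range_succ, List.foldl_append, ih (by omega)]
    simp only [List.foldl_cons, List.foldl_nil]
    rw [aStep_formula lst k hk t (by omega) _ _]
    have : bmF lst k.toNat (t+1) = bmStep lst k.toNat (bmF lst k.toNat t) t := by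
      unfold bmF; rw [List.range_succ, List.foldl_append]; rfl
    rw [this]

-- windows determined by groups of kn consecutive zeros
def Lw (lst : List Int) (j : Nat) : Nat :=
  if j = 0 then 0 else (ZI lst).getD (j-1) 0 + 1
def eW (lst : List Int) (kn j : Nat) : Nat :=
  if j + kn < (ZI lst).length then (ZI lst).getD (j+kn) 0 else lst.length
def bdry (lst : List Int) (kn : Nat) : Nat → Nat
  | 0 => 0
  | (j+1) => eW lst kn j
def wStep (lst : List Int) (kn : Nat) (s : Int × Nat) (j : Nat) : Int × Nat :=
  if ((eW lst kn j : Nat) : Int) - (Lw lst j : Nat) > s.1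
  then (((eW lst kn j : Nat) : Int) - (Lw lst j : Nat), Lw lst j) else s
def wF (lst : List Int) (kn : Nat) (jj : Nat) : Int × Nat :=
  (List.range jj).foldl (wStep lst kn) (0, 0)

lemma eW_le_len (lst : List Int) (kn j : Nat) : eW lst kn j ≤ lst.length := by
  unfold eW
  split
  · exact le_of_lt (ZI_lt_length lst _ (getD_mem_of_lt _ _ (by omega)))
  · exact le_rfl

lemma bdry_lt_eW (lst : List Int) (kn : Nat) (j : Nat) (hj : j + 1 ≤ (ZI lst).length - kn)
    (hm : kn < (ZI lst).length) : bdry lst kn (j+1) ≤ eW lst kn (j+1) ∧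
      (0 < j + 1 → bdry lst kn (j+1) < eW lst kn (j+1)) := by
  have hjm : j + kn < (ZI lst).length := by omega
  have h1 : bdry lst kn (j+1) = (ZI lst).getD (j+kn) 0 := by
    show eW lst kn j = _
    unfold eW; rw [if_pos hjm]
  constructor
  · unfold eW
    split
    · rw [h1]
      exact le_of_lt (sorted_getD_lt (ZI_sorted lst) (by omega) (by omega))
    · rw [h1]
      exact le_of_lt (ZI_lt_length lst _ (getD_mem_of_lt _ _ hjm))
  · intro _
    unfold eW
    split
    · rw [h1]
      exact sorted_getD_lt (ZI_sorted lst) (by omega) (by omega)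
    · rw [h1]
      exact ZI_lt_length lst _ (getD_mem_of_lt _ _ hjm)

lemma ZI_getD_eq_getElem (lst : List Int) (i : Nat) (h : i < (ZI lst).length) :
    (ZI lst).getD i 0 = (ZI lst)[i] := by
  rw [List.getD_eq_getElem?_getD]
  simp [List.getElem?_eq_getElem h]

-- inside segment j the canonical window start is Lw j
lemma sFm_in_seg (lst : List Int) (kn : Nat) (hm : kn < (ZI lst).length) (j : Nat)
    (hj : j ≤ (ZI lst).length - kn) (i : Nat) (h1 : bdry lst kn j ≤ i) (h2 : i < eW lst kn j) :
    sFm lst kn (i+1) = Lw lst j := by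
  cases j with
  | zero =>
    have he : eW lst kn 0 = (ZI lst).getD kn 0 := by
      unfold eW; rw [if_pos (by omega)]; norm_num
    have hple : pcnt lst (i+1) ≤ kn := by
      apply sorted_count_le
      intro idx hidx hge
      have hA := sorted_getD_le (ZI_sorted lst) hge hidx
      rw [ZI_getD_eq_getElem lst idx hidx] at hA
      omega
    unfold sFm Lw
    rw [if_pos hple]
    rfl
  | succ s =>
    have hjm : s + kn < (ZI lst).length := by omega
    have hbd : bdry lst kn (s+1) = (ZI lst).getD (s+kn) 0 := by
      show eW lst kn s = _
      unfold eW; rw [if_pos hjm]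
    have hple : pcnt lst (i+1) = s + kn + 1 := by
      apply le_antisymm
      · apply sorted_count_le
        intro idx hidx hge
        unfold eW at h2
        by_cases hcase : s + 1 + kn < (ZI lst).length
        · rw [if_pos hcase] at h2
          have hA := sorted_getD_le (ZI_sorted lst) (show s+1+kn ≤ idx by omega) hidx
          rw [ZI_getD_eq_getElem lst idx hidx] at hA
          omega
        · omega
      · apply sorted_count_ge _ _ (by omega)
        intro idx hidx hlt
        have hA := sorted_getD_le (ZI_sorted lst) (show idx ≤ s+kn by omega) hjm
        rw [ZI_getD_eq_getElem lst idx hidx] at hA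
        omega
    unfold sFm Lw
    rw [hple, if_neg (by omega), if_neg (by omega)]
    congr 2
    omega

-- folding A's best-window update over one segment with constant window start
lemma segfold (lst : List Int) (kn L' : Nat) :
    ∀ c b (s0 : Int × Nat), (∀ i, b ≤ i → i < b + c → sFm lst kn (i+1) = L') →
      (List.range' b c).foldl (bmStep lst kn) s0 =
        if 0 < c ∧ (((b + c : Nat) : Int) - (L' : Nat) > s0.1)
        then (((b + c : Nat) : Int) - (L' : Nat), L') else s0 := by
  intro c
  induction c with
  | zero => intro b s0 _; simp
  | succ c ih =>
    intro b s0 h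
    have hsplit : List.range' b (c+1) = List.range' b c ++ [b+c] := by
      have := List.range'_concat (s := b) (n := c) (step := 1)
      simpa using this
    rw [hsplit, List.foldl_append, ih b s0 (fun i h1 h2 => h i h1 (by omega))]
    simp only [List.foldl_cons, List.foldl_nil]
    unfold bmStep
    rw [h (b+c) (by omega) (by omega)]
    by_cases hc : 0 < c ∧ (((b + c : Nat) : Int) - (L' : Nat) > s0.1)
    · rw [if_pos hc]
      have hcond : ((b + c : Nat) : Int) - (L' : Nat) + 1 >
          (((((b + c : Nat) : Int) - (L' : Nat)), L') : Int × Nat).1 := by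
        simp
      rw [if_pos hcond, if_pos (⟨by omega, by push_cast at hc ⊢; omega⟩ :
        0 < c + 1 ∧ ((b + (c+1) : Nat) : Int) - (L' : Nat) > s0.1)]
      simp only [Prod.mk.injEq]
      exact ⟨by push_cast; ring, trivial⟩
    · rw [if_neg hc]
      by_cases hd : ((b + c : Nat) : Int) - (L' : Nat) + 1 > s0.1
      · rw [if_pos hd, if_pos (⟨by omega, by push_cast at hd ⊢; omega⟩ :
          0 < c + 1 ∧ ((b + (c+1) : Nat) : Int) - (L' : Nat) > s0.1)]
        simp only [Prod.mk.injEq]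
        exact ⟨by push_cast; ring, trivial⟩
      · rw [if_neg hd, if_neg ?_]
        push_cast at hd ⊢
        intro hcon
        omega

-- grouping A's per-index fold into B's per-window fold
lemma bm_grouped (lst : List Int) (kn : Nat) (hm : kn < (ZI lst).length) :
    ∀ j, j ≤ (ZI lst).length - kn + 1 → bmF lst kn (bdry lst kn j) = wF lst kn j := by
  intro j
  induction j with
  | zero => intro _; rfl
  | succ j ih =>
    intro hj
    have hble : bdry lst kn j ≤ eW lst kn j := by
      cases j with
      | zero => exact Nat.zero_le _
      | succ s => exact (bdry_lt_eW lst kn s (by omega) hm).1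
    have hbsplit : List.range (eW lst kn j) =
        List.range (bdry lst kn j) ++ List.range' (bdry lst kn j) (eW lst kn j - bdry lst kn j) := by
      rw [List.range_eq_range', List.range_eq_range']
      have := List.range'_append (s := 0) (m := bdry lst kn j)
        (n := eW lst kn j - bdry lst kn j) (step := 1)
      simp only [Nat.zero_add, Nat.one_mul] at this
      rw [this, show bdry lst kn j + (eW lst kn j - bdry lst kn j) = eW lst kn j by omega]
    have hseg := segfold lst kn (Lw lst j) (eW lst kn j - bdry lst kn j) (bdry lst kn j)
      (bmF lst kn (bdry lst kn j))
      (fun i hi1 hi2 => sFm_in_seg lst kn hm j (by omega) i hi1 (by omega))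
    have hstep : bmF lst kn (bdry lst kn (j+1)) = wStep lst kn (bmF lst kn (bdry lst kn j)) j := by
      show bmF lst kn (eW lst kn j) = _
      unfold bmF
      rw [hbsplit, List.foldl_append]
      have : (List.range (bdry lst kn j)).foldl (bmStep lst kn) (0,0) = bmF lst kn (bdry lst kn j) := rfl
      rw [this, hseg]
      unfold wStep
      rw [show bdry lst kn j + (eW lst kn j - bdry lst kn j) = eW lst kn j by omega]
      by_cases hcz : 0 < eW lst kn j - bdry lst kn j
      · by_cases hgt : ((eW lst kn j : Nat) : Int) - (Lw lst j : Nat) > (bmF lst kn (bdry lst kn j)).1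
        · rw [if_pos ⟨hcz, hgt⟩, if_pos hgt]
        · rw [if_neg (by tauto), if_neg hgt]
      · -- empty segment: only j = 0 with eW = 0 = Lw 0; no update on either side
        cases j with
        | zero =>
          have hb0 : bdry lst kn 0 = 0 := rfl
          have he0 : eW lst kn 0 = 0 := by omega
          have hno : ¬ ((eW lst kn 0 : Nat) : Int) - (Lw lst 0 : Nat) > (bmF lst kn (bdry lst kn 0)).1 := by
            rw [hb0, he0]
            simp [Lw, bmF]
          rw [if_neg (by tauto), if_neg hno]
        | succ s =>
          exact absurd ((bdry_lt_eW lst kn s (by omega) hm).2 (by omega)) (by omega)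
    rw [hstep, ih (by omega)]
    symm
    show (List.range (j+1)).foldl (wStep lst kn) (0,0) = _
    rw [List.range_succ, List.foldl_append]
    rfl

lemma bdry_top (lst : List Int) (kn : Nat) (hm : kn < (ZI lst).length) :
    bdry lst kn ((ZI lst).length - kn + 1) = lst.length := by
  show eW lst kn ((ZI lst).length - kn) = lst.length
  unfold eW
  rw [if_neg (by omega)]

-- invariants of the window fold
lemma wF_inv (lst : List Int) (kn : Nat) :
    ∀ jj, 0 ≤ (wF lst kn jj).1 ∧ ((wF lst kn jj).2 : Int) + (wF lst kn jj).1 ≤ lst.length := by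
  intro jj
  induction jj with
  | zero =>
    constructor
    · exact le_refl 0
    · show ((0:Nat) : Int) + (0 : Int) ≤ _; simp
  | succ j ih =>
    have hstep : wF lst kn (j+1) = wStep lst kn (wF lst kn j) j := by
      unfold wF; rw [List.range_succ, List.foldl_append]; rfl
    rw [hstep]
    unfold wStep
    split
    · have hle := eW_le_len lst kn j
      constructor
      · simp only
        omega
      · simp only
        push_cast
        omega
    · exact ih

-- a guarded filterMap is a filtered map
lemma filterMap_guard {α β : Type} (p : α → Prop) [DecidablePred p] (f : α → β) (l : List α) :
    l.filterMap (fun i => if p i then some (f i) else none) = (l.filter (fun i => p i)).map f := by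
  induction l with
  | nil => rfl
  | cons a tl ih =>
    by_cases hp : p a
    · rw [List.filterMap_cons, List.filter_cons]
      simp [hp, ih]
    · rw [List.filterMap_cons, List.filter_cons]
      simp [hp, ih]

-- two strictly sorted lists with the same members are equal
lemma sorted_lt_ext (l1 : List Int) :
    ∀ l2 : List Int, List.Pairwise (· < ·) l1 → List.Pairwise (· < ·) l2 →
      (∀ x, x ∈ l1 ↔ x ∈ l2) → l1 = l2 := by
  induction l1 with
  | nil =>
    intro l2 _ _ hmem
    cases l2 with
    | nil => rfl
    | cons b t2 => exact absurd ((hmem b).2 (List.mem_cons_self)) (List.not_mem_nil)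
  | cons a t1 ih =>
    intro l2 h1 h2 hmem
    cases l2 with
    | nil => exact absurd ((hmem a).1 (List.mem_cons_self)) (List.not_mem_nil)
    | cons b t2 =>
      rcases List.pairwise_cons.1 h1 with ⟨ha, ht1⟩
      rcases List.pairwise_cons.1 h2 with ⟨hb, ht2⟩
      have hab : a = b := by
        rcases List.mem_cons.1 ((hmem a).1 (List.mem_cons_self)) with h | h
        · exact h
        · rcases List.mem_cons.1 ((hmem b).2 (List.mem_cons_self)) with h' | h'
          · exact h'.symm
          · have := hb a h
            have := ha b h'
            omega
      subst hab
      have : t1 = t2 := by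
        apply ih t2 ht1 ht2
        intro x
        constructor
        · intro hx
          rcases List.mem_cons.1 ((hmem x).1 (List.mem_cons.2 (Or.inr hx))) with h | h
          · exact absurd (h ▸ ha x hx) (lt_irrefl _)
          · exact h
        · intro hx
          rcases List.mem_cons.1 ((hmem x).2 (List.mem_cons.2 (Or.inr hx))) with h | h
          · exact absurd (h ▸ hb x hx) (lt_irrefl _)
          · exact h
      rw [this]

-- A's final collection loop equals B's filter of the zero list
lemma fin_lemma (lst : List Int) (x : Nat) (b : Int) (hb : 0 ≤ b)
    (hxb : (x : Int) + b ≤ lst.length) :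
    (PySem.List.pyRange (x : Int) ((x : Int) + b) 1).foldl
      (fun rr i => if PySem.List.pyGet? lst i = some 0 then rr ++ [i] else rr) []
    = ((ZI lst).map (fun (z : Nat) => (z : Int))).filter
        (fun z => decide ((x : Int) ≤ z) && decide (z ≤ (x : Int) + b - 1)) := by
  rw [PySem.List.foldl_append_ite_eq_filter]
  rw [List.nil_append]
  apply sorted_lt_ext
  · exact (PySem.List.pairwise_lt_pyRange_one _ _).filter _
  · refine List.Pairwise.filter _ ?_
    exact List.Pairwise.map _ (fun a b hab => by exact_mod_cast hab) (ZI_sorted lst)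
  · intro y
    simp only [List.mem_filter, PySem.List.mem_pyRange_one, List.mem_map]
    constructor
    · rintro ⟨⟨hy1, hy2⟩, hget⟩
      have hy0 : 0 ≤ y := by omega
      rw [PySem.List.pyGet?_of_nonneg lst hy0] at hget
      simp only [decide_eq_true_eq] at hget
      have hlt : y.toNat < lst.length := by
        by_contra hge
        rw [List.getElem?_eq_none (by omega)] at hget
        simp at hget
      rw [List.getElem?_eq_getElem hlt] at hget
      refine ⟨⟨y.toNat, (mem_ZI lst y.toNat).2 ⟨hlt, ?_⟩, by omega⟩, ?_⟩
      · rw [List.getD_eq_getElem?_getD, List.getElem?_eq_getElem hlt]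
        simpa using hget
      · simp only [Bool.and_eq_true, decide_eq_true_eq]
        omega
    · rintro ⟨⟨z, hz, rfl⟩, hbnd⟩
      simp only [Bool.and_eq_true, decide_eq_true_eq] at hbnd
      rcases (mem_ZI lst z).1 hz with ⟨hzlen, hzz⟩
      refine ⟨⟨by omega, by omega⟩, ?_⟩
      rw [PySem.List.pyGet?_of_nonneg lst (by omega : (0:Int) ≤ (z:Int))]
      simp only [decide_eq_true_eq]
      rw [show ((z : Int)).toNat = z by omega, List.getElem?_eq_getElem hzlen]
      rw [List.getD_eq_getElem?_getD, List.getElem?_eq_getElem hzlen] at hzz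
      simpa using hzz

-- B's loop body, named
def bStep (Z : List Int) (n m k : Int) (st : Int × Int × Int) (j : Nat) : Int × Int × Int :=
  let left : Int := if 0 < j then Z.getD (j - 1) 0 + 1 else 0
  let right : Int := if (j : Int) + k < m then Z.getD (j + k.toNat) 0 - 1 else n - 1
  if right - left + 1 > st.1 then (right - left + 1, left, right) else st

lemma alt_def (lst : List Int) (k : Int) :
    zero_indices_alt lst k =
      (let Z : List Int := (List.range lst.length).filterMap
        (fun i => if lst.getD i 0 = 0 then some (i : Int) else none)
       if (Z.length : Int) ≤ k then Z
       else
         let st := (List.range (((Z.length : Int)) - k + 1).toNat).foldl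
           (bStep Z (lst.length : Int) (Z.length : Int) k) (0, 0, -1)
         Z.filter (fun z => st.2.1 ≤ z && z ≤ st.2.2)) := rfl

lemma Z_eq (lst : List Int) :
    (List.range lst.length).filterMap
      (fun i => if lst.getD i 0 = 0 then some (i : Int) else none) =
    (ZI lst).map (fun (z : Nat) => (z : Int)) := by
  rw [filterMap_guard (fun i => lst.getD i 0 = 0) (fun (i : Nat) => (i : Int))]
  rfl

lemma map_getD_cast (l : List Nat) (i : Nat) (h : i < l.length) :
    (l.map (fun (z : Nat) => (z : Int))).getD i 0 = ((l.getD i 0 : Nat) : Int) := by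
  rw [List.getD_eq_getElem?_getD, List.getD_eq_getElem?_getD]
  simp [List.getElem?_eq_getElem, h]

-- B's fold equals the window fold
lemma B_fold (lst : List Int) (k : Int) (hk : 0 ≤ k) (hm : k.toNat < (ZI lst).length) :
    ∀ jj, jj ≤ (ZI lst).length - k.toNat + 1 →
    (List.range jj).foldl
      (bStep ((ZI lst).map (fun (z : Nat) => (z : Int))) (lst.length : Int)
        (((ZI lst).length : Nat) : Int) k) (0, 0, -1)
    = ((wF lst k.toNat jj).1, ((wF lst k.toNat jj).2 : Int),
       ((wF lst k.toNat jj).2 : Int) + (wF lst k.toNat jj).1 - 1) := by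
  have hkk : ((k.toNat : Nat) : Int) = k := Int.toNat_of_nonneg hk
  set kn := k.toNat with hkn
  set m := (ZI lst).length with hmdef
  intro jj
  induction jj with
  | zero => intro _; rfl
  | succ j ih =>
    intro hj
    rw [List.range_succ, List.foldl_append, ih (by omega)]
    simp only [List.foldl_cons, List.foldl_nil]
    have hwstep : wF lst kn (j+1) = wStep lst kn (wF lst kn j) j := by
      unfold wF; rw [List.range_succ, List.foldl_append]; rfl
    rw [hwstep]
    unfold bStep
    have hleft : (if 0 < j then ((ZI lst).map (fun (z : Nat) => (z : Int))).getD (j - 1) 0 + 1 else (0:Int))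
        = ((Lw lst j : Nat) : Int) := by
      unfold Lw
      cases j with
      | zero => simp
      | succ s =>
        rw [if_pos (by omega), if_neg (by omega), map_getD_cast _ _ (by omega)]
        push_cast
        ring
    have hright : (if (j : Int) + k < (((ZI lst).length : Nat) : Int)
          then ((ZI lst).map (fun (z : Nat) => (z : Int))).getD (j + k.toNat) 0 - 1
          else (lst.length : Int) - 1)
        = ((eW lst kn j : Nat) : Int) - 1 := by
      unfold eW
      by_cases hc : j + kn < m
      · rw [if_pos (by omega), if_pos (by push_cast; omega), ← hkn, map_getD_cast _ _ (by omega)]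
      · rw [if_neg (by omega), if_neg (by push_cast; omega)]
    rw [hleft, hright]
    unfold wStep
    by_cases hupd : ((eW lst kn j : Nat) : Int) - ((Lw lst j : Nat) : Int) > (wF lst kn j).1
    · rw [if_pos (by omega), if_pos hupd]
      simp only [Prod.mk.injEq]
      exact ⟨by ring, trivial, by ring⟩
    · rw [if_neg (by omega), if_neg hupd]

lemma A_result (lst : List Int) (k : Int) (hk : 0 ≤ k) :
    zero_indices lst k =
      (PySem.List.pyRange ((bmF lst k.toNat lst.length).2 : Int)
        (((bmF lst k.toNat lst.length).2 : Int) + (bmF lst k.toNat lst.length).1) 1).foldl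
        (fun rr i => if PySem.List.pyGet? lst i = some 0 then rr ++ [i] else rr) [] := by
  rw [zero_indices_def, stateA lst k hk lst.length le_rfl]

theorem zi_equiv (lst : List Int) (k : Int) (hk : 0 ≤ k) :
    zero_indices lst k = zero_indices_alt lst k := by
  have hkk : ((k.toNat : Nat) : Int) = k := Int.toNat_of_nonneg hk
  set kn := k.toNat with hkn
  set m := (ZI lst).length with hmdef
  rw [A_result lst k hk, alt_def]
  simp only [Z_eq, List.length_map]
  by_cases hcase : m ≤ kn
  · -- all zeros fit: the best window is the whole list
    rw [if_pos (by omega)]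
    have hbm' : bmF lst kn lst.length =
        if 0 < lst.length ∧ ((0 + lst.length : Nat) : Int) - (((0:Nat) : Nat) : Int) > ((0,0) : Int × Nat).1
        then (((0 + lst.length : Nat) : Int) - (((0:Nat) : Nat) : Int), ((0:Nat) : Nat)) else ((0,0) : Int × Nat) := by
      unfold bmF
      rw [List.range_eq_range']
      exact segfold lst kn 0 lst.length 0 (0,0)
        (fun i _ _ => by
          unfold sFm
          rw [if_pos (by have := pcnt_le_len lst (i+1); omega)])
    by_cases hn : lst.length = 0
    · have hZ : ZI lst = [] := by
        unfold ZI; rw [hn]; rfl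
      have hbm0 : bmF lst kn lst.length = ((0 : Int), (0 : Nat)) := by
        rw [hbm', if_neg (by omega)]
      rw [hbm0, hZ]
      simp [PySem.List.pyRange_one_eq_nil]
    · have hbmn : bmF lst kn lst.length = ((lst.length : Int), (0 : Nat)) := by
        rw [hbm', if_pos ⟨by omega, by simp; omega⟩]
        simp
      rw [hbmn]
      have hfin := fin_lemma lst 0 (lst.length : Int) (by omega) (by simp)
      simp only [Nat.cast_zero] at hfin ⊢
      rw [hfin]
      apply List.filter_eq_self.mpr
      intro z hz
      rcases List.mem_map.1 hz with ⟨zn, hzn, rfl⟩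
      have := ZI_lt_length lst zn hzn
      simp only [Bool.and_eq_true, decide_eq_true_eq]
      omega
  · -- more than k zeros: best window among the zero groups
    have hm : kn < m := by omega
    rw [if_neg (by omega)]
    have htn : (((m : Nat) : Int) - k + 1).toNat = m - kn + 1 := by omega
    rw [htn, B_fold lst k hk hm (m - kn + 1) le_rfl]
    have hA : bmF lst kn lst.length = wF lst kn (m - kn + 1) := by
      rw [← bdry_top lst kn hm]
      exact bm_grouped lst kn hm _ le_rfl
    rw [hA]
    have hinv := wF_inv lst kn (m - kn + 1)
    rw [fin_lemma lst (wF lst kn (m - kn + 1)).2 (wF lst kn (m - kn + 1)).1 hinv.1 (by omega)]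

-- ===== VERDICT (by name: the statement is the Claim_ definition above) =====
theorem zero_indices_spec : Claim_equal_zero_indices := by
  intro lst k _ hk
  exact zi_equiv lst k hk
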